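-- pv_equiv track=rewrite | github.com/xmatekaj/wmbus | decode_wmbus.py | decode_faults
-- ===== SOURCE A (Python) =====
-- _FAULTS_CURRENT = {
--     15: "Flow below minimum",
--     14: "Flow above maximum",
--     13: "Reverse flow",
--     12: "No flow",
--     11: "Water leak",
--     10: "Disconnection",
--      9: "Magnetic field",
-- }
--
-- _FAULTS_MEMORY = {
--      8: "Low battery",
--      7: "Flow below minimum (hist.)",
--      6: "Flow above maximum (hist.)",
--      5: "Reverse flow (hist.)",
--      4: "No flow (hist.)",
--      3: "Water leak (hist.)",
--      2: "Disconnection (hist.)",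
--      1: "Magnetic field (hist.)",
--      0: "Battery lifetime exceeded",
-- }
--
-- def decode_faults(word: int | None) -> list[str]:
--     if word is None:
--         return []
--     if word == 0:
--         return ["OK"]
--     msgs = []
--     for bit, name in sorted({**_FAULTS_CURRENT, **_FAULTS_MEMORY}.items(), reverse=True):
--         if word & (1 << bit):
--             msgs.append(name)
--     return msgs
-- ===== SOURCE B (Python) =====
-- _FAULT_TABLE = {
--     15: "Flow below minimum",
--     14: "Flow above maximum",
--     13: "Reverse flow",
--     12: "No flow",
--     11: "Water leak",
--     10: "Disconnection",
--      9: "Magnetic field",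
--      8: "Low battery",
--      7: "Flow below minimum (hist.)",
--      6: "Flow above maximum (hist.)",
--      5: "Reverse flow (hist.)",
--      4: "No flow (hist.)",
--      3: "Water leak (hist.)",
--      2: "Disconnection (hist.)",
--      1: "Magnetic field (hist.)",
--      0: "Battery lifetime exceeded",
-- }
--
-- def decode_faults(word: int | None) -> list[str]:
--     if word is None:
--         return []
--     if word == 0:
--         return ["OK"]
--     w = word & 0xFFFF  # only bits 0..15 carry fault flags
--     msgs = []
--     while w:
--         bit = w.bit_length() - 1       # highest set bit still present
--         msgs.append(_FAULT_TABLE[bit])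
--         w -= 1 << bit
--     return msgs
-- ===== Notes on version B (the rewrite author's own statement) =====
-- stated objective: alternative
-- what changed: Instead of scanning the whole merged 16-entry fault table and testing each bit of the word, B masks the word to its low 16 bits once and loops only over the set bits, peeling the highest set bit (via bit_length) each iteration and looking its message up in a single table.
import Mathlib
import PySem

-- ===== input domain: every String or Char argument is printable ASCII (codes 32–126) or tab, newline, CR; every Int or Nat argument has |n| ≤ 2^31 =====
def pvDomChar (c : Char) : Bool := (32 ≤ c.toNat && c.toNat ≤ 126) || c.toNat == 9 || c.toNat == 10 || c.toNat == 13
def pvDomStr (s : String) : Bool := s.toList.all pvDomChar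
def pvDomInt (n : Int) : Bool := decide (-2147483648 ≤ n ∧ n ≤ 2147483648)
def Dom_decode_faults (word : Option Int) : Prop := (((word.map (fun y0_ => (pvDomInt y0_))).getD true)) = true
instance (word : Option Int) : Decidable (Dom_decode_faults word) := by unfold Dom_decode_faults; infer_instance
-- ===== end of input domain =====

-- B iterates over the set bits of word & 0xFFFF (peeling the highest one each time) instead of
-- scanning the whole 16-entry fault table; objective: alternative decomposition of the same decoding.

-- ===== PORT A =====
def pvFaultsCurrent : PySem.Dict Int String := PySem.Dict.ofList
  [(15, "Flow below minimum"), (14, "Flow above maximum"), (13, "Reverse flow"),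
   (12, "No flow"), (11, "Water leak"), (10, "Disconnection"), (9, "Magnetic field")]

def pvFaultsMemory : PySem.Dict Int String := PySem.Dict.ofList
  [(8, "Low battery"), (7, "Flow below minimum (hist.)"), (6, "Flow above maximum (hist.)"),
   (5, "Reverse flow (hist.)"), (4, "No flow (hist.)"), (3, "Water leak (hist.)"),
   (2, "Disconnection (hist.)"), (1, "Magnetic field (hist.)"), (0, "Battery lifetime exceeded")]

-- literal transliteration of A: {**cur, **mem} is Dict.update, sorted(items, reverse=True) is
-- sorted2 on the (bit, name) pairs (lexicographic tuple order), then the append-if loop.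
def decode_faults (word : Option Int) : List String :=
  match word with
  | none => []
  | some w =>
    if w = 0 then ["OK"]
    else
      (PySem.List.sorted2 (PySem.Dict.update pvFaultsCurrent pvFaultsMemory.items).items
          Prod.fst Prod.snd true).foldl
        (fun msgs p =>
          -- 'word & (1 << bit)' ; the bit keys are the literals 0..15, so '.toNat' is exact
          if PySem.Int.band w ((1 : Int) <<< p.1.toNat) ≠ 0 then msgs ++ [p.2] else msgs) []

-- ===== PORT B =====
def pvFaultTable : PySem.Dict Int String := PySem.Dict.ofList
  [(15, "Flow below minimum"), (14, "Flow above maximum"), (13, "Reverse flow"),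
   (12, "No flow"), (11, "Water leak"), (10, "Disconnection"), (9, "Magnetic field"),
   (8, "Low battery"), (7, "Flow below minimum (hist.)"), (6, "Flow above maximum (hist.)"),
   (5, "Reverse flow (hist.)"), (4, "No flow (hist.)"), (3, "Water leak (hist.)"),
   (2, "Disconnection (hist.)"), (1, "Magnetic field (hist.)"), (0, "Battery lifetime exceeded")]

-- the 'while w:' loop of B; w = word & 0xFFFF is nonnegative, kept as a Nat
-- (the table lookup never misses: bit ≤ 15 since w < 2^16, so getD with a junk default is exact)
def pvAltLoop (w : Nat) (msgs : List String) : List String :=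
  if h : w = 0 then msgs
  else
    let bit := PySem.Int.bitLength (w : Int) - 1   -- w.bit_length() - 1, the highest set bit
    pvAltLoop (w - (1 <<< bit)) (msgs ++ [PySem.Dict.getD pvFaultTable (bit : Int) ""])
termination_by w
decreasing_by
  simp only [Nat.one_shiftLeft]
  have := Nat.two_pow_pos (PySem.Int.bitLength (w : Int) - 1)
  omega

def decode_faults_alt (word : Option Int) : List String :=
  match word with
  | none => []
  | some w =>
    if w = 0 then ["OK"]
    else pvAltLoop (PySem.Int.band w 65535).toNat []

-- ===== PRECONDITION & SPEC =====
def Spec_decode_faults (word : Option Int) (out : List String) : Prop := out = decode_faults_alt word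
instance (word : Option Int) (out : List String) : Decidable (Spec_decode_faults word out) := by unfold Spec_decode_faults; infer_instance

-- ===== CLAIM (what is proved, stated in full; the proofs are below) =====
def Claim_equal_decode_faults : Prop := ∀ (word : Option Int), Dom_decode_faults word → Spec_decode_faults word (decode_faults word)

-- ===== LEMMAS AND PROOFS =====

-- the per-bit blocks of the decoded message list, highest bit first
def pvListA (m : Nat) : List String :=
  (if m.testBit 15 then ["Flow below minimum"] else []) ++
  (if m.testBit 14 then ["Flow above maximum"] else []) ++
  (if m.testBit 13 then ["Reverse flow"] else []) ++
  (if m.testBit 12 then ["No flow"] else []) ++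
  (if m.testBit 11 then ["Water leak"] else []) ++
  (if m.testBit 10 then ["Disconnection"] else []) ++
  (if m.testBit 9 then ["Magnetic field"] else []) ++
  (if m.testBit 8 then ["Low battery"] else []) ++
  (if m.testBit 7 then ["Flow below minimum (hist.)"] else []) ++
  (if m.testBit 6 then ["Flow above maximum (hist.)"] else []) ++
  (if m.testBit 5 then ["Reverse flow (hist.)"] else []) ++
  (if m.testBit 4 then ["No flow (hist.)"] else []) ++
  (if m.testBit 3 then ["Water leak (hist.)"] else []) ++
  (if m.testBit 2 then ["Disconnection (hist.)"] else []) ++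
  (if m.testBit 1 then ["Magnetic field (hist.)"] else []) ++
  (if m.testBit 0 then ["Battery lifetime exceeded"] else [])

lemma pv_xor_mod_two (a b : Nat) : (a ^^^ b) % 2 = (a % 2) ^^^ (b % 2) := by
  rw [Nat.xor_mod_two_eq]
  rcases Nat.mod_two_eq_zero_or_one a with h | h <;>
    rcases Nat.mod_two_eq_zero_or_one b with h' | h' <;>
      rw [Nat.add_mod, h, h'] <;> decide

lemma pv_xor_decomp (a b : Nat) : a ^^^ b = 2 * ((a / 2) ^^^ (b / 2)) + ((a % 2) ^^^ (b % 2)) := by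
  conv_lhs => rw [← Nat.div_add_mod (a ^^^ b) 2]
  rw [Nat.xor_div_two, pv_xor_mod_two]

lemma pv_mask_xor (p : Nat) : ∀ x : Nat, x < 2 ^ p → (2 ^ p - 1) ^^^ x = 2 ^ p - 1 - x := by
  induction p with
  | zero => intro x hx; interval_cases x; rfl
  | succ p ih =>
    intro x hx
    have hq : x / 2 < 2 ^ p := by omega
    have h1 : (2 ^ (p + 1) - 1) / 2 = 2 ^ p - 1 := by omega
    have h2 : (2 ^ (p + 1) - 1) % 2 = 1 := by
      have : 2 ^ (p + 1) - 1 = 2 * (2 ^ p - 1) + 1 := by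
        have := Nat.one_le_two_pow (n := p); omega
      omega
    rw [pv_xor_decomp, h1, h2, ih _ hq]
    have hx2 := Nat.div_add_mod x 2
    have hm : x % 2 < 2 := Nat.mod_lt _ (by omega)
    rcases Nat.mod_two_eq_zero_or_one x with h | h <;> rw [h] <;> simp <;> omega

-- the low 16 bits of any Python int: 0 ≤ word & 0xFFFF < 2^16
lemma pv_band_lt (n : Int) : (PySem.Int.band n 65535).toNat < 65536 := by
  rcases (by omega : 0 ≤ n ∨ n < 0) with h | h
  · simp only [PySem.Int.band, if_pos h, if_pos (by norm_num : (0:Int) ≤ 65535)]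
    have h1 : ((65535 : Int)).toNat = 65535 := rfl
    rw [h1]
    have h2 := Nat.and_two_pow_sub_one_eq_mod n.toNat 16
    norm_num at h2
    omega
  · simp only [PySem.Int.band, if_neg (by omega : ¬ (0:Int) ≤ n),
      if_pos (by norm_num : (0:Int) ≤ 65535)]
    omega

-- bridge: Python's 'word & (1 << b)' is nonzero iff bit b of 'word & 0xFFFF' is set (b < 16)
lemma pv_band_bit (n : Int) (b : Nat) (hb : b < 16) :
    (PySem.Int.band n ((1 : Int) <<< ((b : Nat) : Int)) ≠ 0) ↔ ((PySem.Int.band n 65535).toNat).testBit b := by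
  have hsh : (1 : Int) <<< ((b : Nat) : Int) = ((2 ^ b : Nat) : Int) := by
    rw [Int.shiftLeft_natCast_right, Int.shiftLeft_eq]
    push_cast
    ring
  have h65 : ((65535 : Int)).toNat = 65535 := rfl
  have hm16 : ∀ k : Nat, k &&& (65535 : Int).toNat = k % 65536 := by
    intro k
    rw [h65]
    have h2 := Nat.and_two_pow_sub_one_eq_mod k 16
    norm_num at h2
    omega
  have h2b : 0 < 2 ^ b := Nat.two_pow_pos b
  rw [hsh]
  rcases (by omega : 0 ≤ n ∨ n < 0) with h | h
  · simp only [PySem.Int.band, if_pos h,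
      if_pos (by positivity : (0:Int) ≤ ((2 ^ b : Nat) : Int)),
      if_pos (by norm_num : (0:Int) ≤ 65535), Int.toNat_natCast]
    rw [Nat.and_two_pow, hm16, show (65536:Nat) = 2^16 from by norm_num, Nat.testBit_mod_two_pow]
    cases ht : n.toNat.testBit b
    · simp [ht]
    · simp [ht, hb, h2b.ne']
  · simp only [PySem.Int.band, if_neg (by omega : ¬ (0:Int) ≤ n),
      if_pos (by positivity : (0:Int) ≤ ((2 ^ b : Nat) : Int)),
      if_pos (by norm_num : (0:Int) ≤ 65535), Int.toNat_natCast]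
    set k := ((-n - 1 : Int)).toNat with hkdef
    have hand : ((2 ^ b : Nat) &&& k) = (k.testBit b).toNat * 2 ^ b := by
      rw [Nat.and_comm, Nat.and_two_pow]
    have hm : (65535 : Int).toNat &&& k = k % 65536 := by
      rw [Nat.and_comm]; exact hm16 k
    rw [hand, hm, h65]
    have hy : k % 65536 < 65536 := Nat.mod_lt _ (by norm_num)
    have hsub : (65535 : Nat) - k % 65536 = 65535 ^^^ (k % 65536) := by
      have h3 := pv_mask_xor 16 (k % 65536) (by norm_num [hy])
      norm_num at h3
      exact h3.symm
    have hbit : ((65535 : Nat) - k % 65536).testBit b = !((k % 65536).testBit b) := by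
      rw [hsub]
      have h65535 : (65535 : Nat) = 2 ^ 16 - 1 := by norm_num
      rw [Nat.testBit_xor, h65535, Nat.testBit_two_pow_sub_one]
      simp [hb]
    have hkb : (k % 65536).testBit b = k.testBit b := by
      rw [show (65536:Nat) = 2^16 from by norm_num, Nat.testBit_mod_two_pow]; simp [hb]
    rw [hbit, hkb]
    cases hkt : k.testBit b
    · simp
    · simp [h2b.ne']

lemma pv_foldl_append_if {a b : Type} (p : a → Prop) [DecidablePred p] (f : a → b)
    (l : List a) (acc : List b) :
    l.foldl (fun out x => if p x then out ++ [f x] else out) acc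
      = acc ++ (l.filter (fun x => decide (p x))).map f := by
  induction l generalizing acc with
  | nil => simp
  | cons x xs ih => by_cases h : p x <;> simp [h, ih]

-- A, at a nonzero word, computes exactly the per-bit blocks of word & 0xFFFF
lemma pv_filter_map_cons {α β : Type} (p : α → Prop) [DecidablePred p] (f : α → β)
    (x : α) (xs : List α) :
    ((x :: xs).filter (fun a => decide (p a))).map f
      = (if p x then [f x] else []) ++ (xs.filter (fun a => decide (p a))).map f := by
  by_cases h : p x <;> simp [h]

lemma pv_A_eq (n : Int) (hn : n ≠ 0) :
    decode_faults (some n) = pvListA ((PySem.Int.band n 65535).toNat) := by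
  have hsort : PySem.List.sorted2 (PySem.Dict.update pvFaultsCurrent pvFaultsMemory.items).items
      Prod.fst Prod.snd true
      = [((15:Int), "Flow below minimum"), (14, "Flow above maximum"), (13, "Reverse flow"),
         (12, "No flow"), (11, "Water leak"), (10, "Disconnection"), (9, "Magnetic field"),
         (8, "Low battery"), (7, "Flow below minimum (hist.)"), (6, "Flow above maximum (hist.)"),
         (5, "Reverse flow (hist.)"), (4, "No flow (hist.)"), (3, "Water leak (hist.)"),
         (2, "Disconnection (hist.)"), (1, "Magnetic field (hist.)"),
         (0, "Battery lifetime exceeded")] := by decide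
  simp only [decode_faults, if_neg hn, hsort]
  rw [pv_foldl_append_if]
  simp only [List.nil_append]
  rw [pv_filter_map_cons, pv_filter_map_cons, pv_filter_map_cons, pv_filter_map_cons,
      pv_filter_map_cons, pv_filter_map_cons, pv_filter_map_cons, pv_filter_map_cons,
      pv_filter_map_cons, pv_filter_map_cons, pv_filter_map_cons, pv_filter_map_cons,
      pv_filter_map_cons, pv_filter_map_cons, pv_filter_map_cons, pv_filter_map_cons]
  simp only [List.filter_nil, List.map_nil, List.append_nil]
  rw [if_congr (pv_band_bit n (Int.toNat 15) (by norm_num)) rfl rfl,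
      if_congr (pv_band_bit n (Int.toNat 14) (by norm_num)) rfl rfl,
      if_congr (pv_band_bit n (Int.toNat 13) (by norm_num)) rfl rfl,
      if_congr (pv_band_bit n (Int.toNat 12) (by norm_num)) rfl rfl,
      if_congr (pv_band_bit n (Int.toNat 11) (by norm_num)) rfl rfl,
      if_congr (pv_band_bit n (Int.toNat 10) (by norm_num)) rfl rfl,
      if_congr (pv_band_bit n (Int.toNat 9) (by norm_num)) rfl rfl,
      if_congr (pv_band_bit n (Int.toNat 8) (by norm_num)) rfl rfl,
      if_congr (pv_band_bit n (Int.toNat 7) (by norm_num)) rfl rfl,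
      if_congr (pv_band_bit n (Int.toNat 6) (by norm_num)) rfl rfl,
      if_congr (pv_band_bit n (Int.toNat 5) (by norm_num)) rfl rfl,
      if_congr (pv_band_bit n (Int.toNat 4) (by norm_num)) rfl rfl,
      if_congr (pv_band_bit n (Int.toNat 3) (by norm_num)) rfl rfl,
      if_congr (pv_band_bit n (Int.toNat 2) (by norm_num)) rfl rfl,
      if_congr (pv_band_bit n (Int.toNat 1) (by norm_num)) rfl rfl,
      if_congr (pv_band_bit n (Int.toNat 0) (by norm_num)) rfl rfl]
  simp only [show Int.toNat 0 = 0 from rfl, show Int.toNat 1 = 1 from rfl, show Int.toNat 2 = 2 from rfl, show Int.toNat 3 = 3 from rfl, show Int.toNat 4 = 4 from rfl, show Int.toNat 5 = 5 from rfl, show Int.toNat 6 = 6 from rfl, show Int.toNat 7 = 7 from rfl, show Int.toNat 8 = 8 from rfl, show Int.toNat 9 = 9 from rfl, show Int.toNat 10 = 10 from rfl, show Int.toNat 11 = 11 from rfl, show Int.toNat 12 = 12 from rfl, show Int.toNat 13 = 13 from rfl, show Int.toNat 14 = 14 from rfl, show Int.toNat 15 = 15 from rfl, pvListA]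
  simp only [List.append_assoc]

-- peeling the highest set bit b of w removes exactly the first nonempty block
lemma pv_listA_step (w b : Nat) (hb : b < 16) (h1 : 2 ^ b ≤ w) (h2 : w < 2 ^ (b + 1)) :
    pvListA w = PySem.Dict.getD pvFaultTable (b : Int) "" :: pvListA (w - 2 ^ b) := by
  have htop : ∀ i, b < i → w.testBit i = false := by
    intro i hi
    exact Nat.testBit_lt_two_pow (lt_of_lt_of_le h2 (Nat.pow_le_pow_right (by omega) hi))
  have hw' : w - 2 ^ b < 2 ^ b := by
    have : 2 ^ (b + 1) = 2 * 2 ^ b := by ring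
    omega
  have hhigh' : ∀ i, b ≤ i → (w - 2 ^ b).testBit i = false := by
    intro i hi
    exact Nat.testBit_lt_two_pow (lt_of_lt_of_le hw' (Nat.pow_le_pow_right (by omega) hi))
  have hbb : w.testBit b = true := by
    rw [Nat.testBit_eq_decide_div_mod_eq]
    have : w / 2 ^ b = 1 := by
      have h2' : 2 ^ (b + 1) = 2 * 2 ^ b := by ring
      apply Nat.div_eq_of_lt_le <;> omega
    simp [this]
  have hlow : ∀ i, i < b → (w - 2 ^ b).testBit i = w.testBit i := by
    intro i hi
    have hwdec : w = 2 ^ b + (w - 2 ^ b) := by omega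
    conv_rhs => rw [hwdec]
    rw [Nat.testBit_two_pow_add_gt hi]
  interval_cases b <;>
    simp_all [pvListA, pvFaultTable] <;> rfl

lemma pv_altLoop_eq : ∀ w : Nat, w < 65536 → ∀ acc : List String,
    pvAltLoop w acc = acc ++ pvListA w := by
  intro w
  induction w using Nat.strong_induction_on with
  | _ w ih =>
    intro hw acc
    by_cases h0 : w = 0
    · subst h0
      rw [pvAltLoop]
      simp [pvListA]
    · rw [pvAltLoop]
      simp only [dif_neg h0]
      set bl := PySem.Int.bitLength (w : Int) with hbl
      have hna : ((w : Int)).natAbs = w := Int.natAbs_natCast w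
      have hlt : w < 2 ^ bl := by
        have := PySem.Int.lt_two_pow_bitLength (w : Int)
        rwa [hna] at this
      have hbl1 : 1 ≤ bl := by
        by_contra hcon
        have : bl = 0 := by omega
        rw [this] at hlt
        omega
      have hle : 2 ^ (bl - 1) ≤ w := by
        have := PySem.Int.two_pow_bitLength_le (w : Int) (by exact_mod_cast h0)
        rwa [hna] at this
      set b := bl - 1 with hbdef
      have hsucc : b + 1 = bl := by omega
      have hb16 : b < 16 := by
        by_contra hcon
        have : (65536 : Nat) = 2 ^ 16 := by norm_num
        have h2 : 2 ^ 16 ≤ 2 ^ b := Nat.pow_le_pow_right (by omega) (by omega)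
        omega
      have hsh : (1 : Nat) <<< b = 2 ^ b := Nat.one_shiftLeft b
      rw [hsh]
      have hlt' : w < 2 ^ (b + 1) := by rw [hsucc]; exact hlt
      rw [ih (w - 2 ^ b) (by have := Nat.two_pow_pos b; omega)
            (by omega) (acc ++ [PySem.Dict.getD pvFaultTable (b : Int) ""])]
      rw [pv_listA_step w b hb16 hle hlt']
      simp

lemma pv_B_eq (n : Int) (hn : n ≠ 0) :
    decode_faults_alt (some n) = pvListA ((PySem.Int.band n 65535).toNat) := by
  simp only [decode_faults_alt, if_neg hn]
  rw [pv_altLoop_eq _ (pv_band_lt n) []]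
  simp

-- ===== VERDICT (by name: the statement is the Claim_ definition above) =====
theorem decode_faults_spec : Claim_equal_decode_faults := by
  intro word _
  unfold Spec_decode_faults
  match word with
  | none => rfl
  | some n =>
    by_cases hn : n = 0
    · subst hn; rfl
    · rw [pv_A_eq n hn, pv_B_eq n hn]
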